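-- pv_equiv track=rewrite | github.com/hockeyman0/Prelab12 | InstructionFetchAndDecode.py | getPartialValue
-- ===== SOURCE A (Python) =====
-- def getPartialValue(index1,index2,num):
--     mask = 0
--     ran = range(0,index2 + 1)
--     for number in ran:
--         mask = mask + (pow(2,number))
--     new = num & mask
--     ran = range(0,index1+1)
--     bit = new>>index1
--     return bit
-- ===== SOURCE B (Python) =====
-- def getPartialValue(index1, index2, num):
--     result = 0
--     pos = 0
--     for i in range(index1, index2 + 1):
--         result += ((num >> i) & 1) << pos
--         pos += 1
--     return result
-- ===== Notes on version B (the rewrite author's own statement) =====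
-- stated objective: faster
-- what changed: A builds a full low mask by summing powers of two over range(0,index2+1), ANDs it with num and shifts; B never forms a mask and instead reconstructs the result bit by bit, looping over the output bit positions range(index1,index2+1) and accumulating ((num>>i)&1)<<pos.
import Mathlib
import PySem

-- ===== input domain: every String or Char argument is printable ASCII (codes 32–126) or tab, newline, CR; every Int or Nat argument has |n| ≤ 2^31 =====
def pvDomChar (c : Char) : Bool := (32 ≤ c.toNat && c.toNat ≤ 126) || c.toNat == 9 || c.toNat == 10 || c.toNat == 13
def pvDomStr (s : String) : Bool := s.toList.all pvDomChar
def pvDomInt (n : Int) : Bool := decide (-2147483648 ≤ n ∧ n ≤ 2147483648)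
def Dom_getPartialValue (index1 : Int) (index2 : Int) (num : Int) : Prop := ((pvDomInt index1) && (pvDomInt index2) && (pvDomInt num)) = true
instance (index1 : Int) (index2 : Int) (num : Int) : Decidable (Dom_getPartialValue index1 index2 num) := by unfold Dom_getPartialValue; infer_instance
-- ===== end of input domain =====

-- B replaces A's mask-build/AND/shift by a bit-by-bit reconstruction loop over only the output
-- bit positions index1..index2 (objective: faster — A's loop over 0..index2 builds an ever-growing mask).

-- ===== PORT A =====
-- Literal port of A: build mask = Σ 2^number over range(0, index2+1), AND, shift right.
-- pow(2, number) is ported as 2 ^ number.toNat — exact, since every range element is ≥ 0.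
-- (A's second `ran = range(0, index1+1)` is dead code and binds nothing the result uses.)
def getPartialValue (index1 : Int) (index2 : Int) (num : Int) : Int :=
  let mask := (PySem.List.pyRange 0 (index2 + 1)).foldl (fun mask number => mask + 2 ^ number.toNat) 0
  let new := PySem.Int.band num mask
  let bit := new >>> index1.toNat
  bit

-- ===== PORT B =====
-- Literal port of Source B: accumulator/position pair folded over range(index1, index2+1).
-- Shift amounts are .toNat — exact under Pre_ (index1 ≥ 0, so every i in the range is ≥ 0).
def getPartialValue_alt (index1 : Int) (index2 : Int) (num : Int) : Int :=
  ((PySem.List.pyRange index1 (index2 + 1)).foldl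
      (fun (st : Int × Int) i => (st.1 + (PySem.Int.band (num >>> i.toNat) 1) <<< st.2.toNat, st.2 + 1))
      (0, 0)).1

-- ===== PRECONDITION & SPEC =====
-- Pre_ excludes index1 < 0, where Python A raises ValueError ('negative shift count') at num >> index1.
def Pre_getPartialValue (index1 : Int) (index2 : Int) (num : Int) : Prop := 0 ≤ index1
instance (index1 : Int) (index2 : Int) (num : Int) : Decidable (Pre_getPartialValue index1 index2 num) := by unfold Pre_getPartialValue; infer_instance
def pvWitness_getPartialValue : Int × Int × Int := (2, 5, 43)

def Spec_getPartialValue (index1 : Int) (index2 : Int) (num : Int) (out : Int) : Prop := out = getPartialValue_alt index1 index2 num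
instance (index1 : Int) (index2 : Int) (num : Int) (out : Int) : Decidable (Spec_getPartialValue index1 index2 num out) := by unfold Spec_getPartialValue; infer_instance

-- ===== CLAIM (what is proved, stated in full; the proofs are below) =====
def Claim_equal_getPartialValue : Prop := ∀ (index1 : Int) (index2 : Int) (num : Int), Dom_getPartialValue index1 index2 num → Pre_getPartialValue index1 index2 num → Spec_getPartialValue index1 index2 num (getPartialValue index1 index2 num)
-- ===== LEMMAS AND PROOFS =====

-- A's mask loop sums to 2^(n+1) - 1.
theorem pv_mask_sum (n : Nat) :
    (PySem.List.pyRange 0 ((n : Int) + 1)).foldl (fun (mask : Int) number => mask + 2 ^ number.toNat) (0 : Int)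
      = (2 : Int) ^ (n + 1) - 1 := by
  induction n with
  | zero => decide
  | succ k ih =>
    have h : (0 : Int) ≤ (k : Int) + 1 := by positivity
    have hr : PySem.List.pyRange 0 ((k : Int) + 1 + 1) = PySem.List.pyRange 0 ((k : Int) + 1) ++ [(k : Int) + 1] :=
      PySem.List.pyRange_one_succ_right h
    have hcast : ((k + 1 : Nat) : Int) + 1 = ((k : Int) + 1 + 1) := by push_cast; ring
    rw [hcast, hr, List.foldl_append, ih]
    have ht : ((k : Int) + 1).toNat = k + 1 := by omega
    simp only [List.foldl_cons, List.foldl_nil, ht]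
    have hp : (2:Int)^(k+1+1) = 2^(k+1) + 2^(k+1) := by rw [pow_succ]; ring
    rw [hp]; ring

-- (-a - 1) % M reflects a % M.
theorem pv_neg_emod (a M : Int) (hM : 0 < M) : (-a - 1) % M = M - 1 - a % M := by
  have h0 : 0 ≤ a % M := Int.emod_nonneg a (by omega)
  have h1 : a % M < M := Int.emod_lt_of_pos a hM
  have hd := Int.ediv_add_emod a M
  have hrw : -a - 1 = (M - 1 - a % M) + M * (-(a / M) - 1) := by linarith
  rw [hrw, Int.add_mul_emod_self_left, Int.emod_eq_of_lt (by omega) (by omega)]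

-- Python's num & (2^m - 1) is num mod 2^m, for every (also negative) num.
theorem pv_band_mask (a : Int) (m : Nat) :
    PySem.Int.band a ((2 : Int) ^ m - 1) = a % ((2 : Int) ^ m) := by
  have hMN : ((2 : Int) ^ m) = ((2 ^ m : Nat) : Int) := by push_cast; ring
  have hposN : 0 < 2 ^ m := Nat.two_pow_pos m
  have hM : (0 : Int) < 2 ^ m := by omega
  have hpos' : ¬ (2 : Int) ^ m < 1 := by omega
  have hmaskN : ((2 : Int) ^ m - 1).toNat = 2 ^ m - 1 := by omega
  by_cases ha : 0 ≤ a
  · have hb : PySem.Int.band a ((2 : Int) ^ m - 1)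
        = ((a.toNat &&& ((2 : Int) ^ m - 1).toNat : Nat) : Int) := by
      simp [PySem.Int.band, ha, hpos']
    rw [hb, hmaskN, Nat.and_two_pow_sub_one_eq_mod]
    have hmod := Nat.mod_lt a.toNat hposN
    have hmodi : ((a.toNat % 2 ^ m : Nat) : Int) = a % ((2 : Int) ^ m) := by
      have : a % ((2 : Int) ^ m) = ((a.toNat : Int)) % ((2 ^ m : Nat) : Int) := by
        rw [← hMN]; congr 1; omega
      rw [this, Int.natCast_emod]
    exact hmodi
  · have hb : PySem.Int.band a ((2 : Int) ^ m - 1)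
        = ((((2 : Int) ^ m - 1).toNat - (((2 : Int) ^ m - 1).toNat &&& (-a - 1).toNat) : Nat) : Int) := by
      simp [PySem.Int.band, ha, hpos']
    rw [hb, hmaskN, Nat.land_comm, Nat.and_two_pow_sub_one_eq_mod]
    have hmod := Nat.mod_lt (-a - 1).toNat hposN
    have hmodi : (((-a - 1).toNat % 2 ^ m : Nat) : Int) = (-a - 1) % ((2 : Int) ^ m) := by
      have : (-a - 1) % ((2 : Int) ^ m) = (((-a - 1).toNat : Int)) % ((2 ^ m : Nat) : Int) := by
        rw [← hMN]; congr 1; omega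
      rw [this, Int.natCast_emod]
    have hneg := pv_neg_emod a ((2 : Int) ^ m) hM
    have h0 : 0 ≤ a % ((2 : Int) ^ m) := Int.emod_nonneg a (by omega)
    have h1 : a % ((2 : Int) ^ m) < (2 : Int) ^ m := Int.emod_lt_of_pos a hM
    omega

-- Splitting off the top bit of a low-bits remainder.
theorem pv_emod_split (a M : Int) (hM : 0 < M) : a % (2 * M) = a % M + ((a / M) % 2) * M := by
  have h0 : 0 ≤ a % M := Int.emod_nonneg a (by omega)
  have h1 : a % M < M := Int.emod_lt_of_pos a hM
  have hd := Int.ediv_add_emod a M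
  have hq := Int.ediv_add_emod (a / M) 2
  have hb : 0 ≤ (a / M) % 2 ∧ (a / M) % 2 < 2 := ⟨Int.emod_nonneg _ (by omega), Int.emod_lt_of_pos _ (by omega)⟩
  have hrw : a = (a % M + ((a / M) % 2) * M) + (2 * M) * (a / M / 2) := by
    nlinarith [hd, hq]
  calc a % (2 * M) = ((a % M + ((a / M) % 2) * M) + (2 * M) * (a / M / 2)) % (2 * M) := by rw [← hrw]
    _ = (a % M + ((a / M) % 2) * M) % (2 * M) := by rw [Int.add_mul_emod_self_left]
    _ = a % M + ((a / M) % 2) * M := Int.emod_eq_of_lt (by nlinarith) (by nlinarith)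

-- Closed form for B's fold: over range(s, s+n) it produces the n low-masked bits above s, and position n.
theorem pv_bfold (num : Int) (s : Nat) (n : Nat) :
    (PySem.List.pyRange (s : Int) ((s : Int) + (n : Int))).foldl
        (fun (st : Int × Int) i => (st.1 + (PySem.Int.band (num >>> i.toNat) 1) <<< st.2.toNat, st.2 + 1))
        (0, 0)
      = ((num % 2 ^ (s + n)) / 2 ^ s, (n : Int)) := by
  induction n with
  | zero =>
    rw [PySem.List.pyRange_one_eq_nil (by omega)]
    have h0 : 0 ≤ num % 2 ^ (s + 0) := Int.emod_nonneg num (by positivity)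
    have h1 : num % 2 ^ (s + 0) < 2 ^ s := by
      have := Int.emod_lt_of_pos num (b := 2 ^ (s + 0)) (by positivity)
      simpa using this
    simp only [List.foldl_nil]
    rw [Int.ediv_eq_zero_of_lt h0 h1]
    norm_num
  | succ k ih =>
    have hr : PySem.List.pyRange (s : Int) ((s : Int) + ((k : Int) + 1))
        = PySem.List.pyRange (s : Int) ((s : Int) + (k : Int)) ++ [(s : Int) + (k : Int)] := by
      have : (s : Int) + ((k : Int) + 1) = ((s : Int) + (k : Int)) + 1 := by ring
      rw [this]
      exact PySem.List.pyRange_one_succ_right (by omega)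
    have hcast : (s : Int) + ((k + 1 : Nat) : Int) = (s : Int) + ((k : Int) + 1) := by push_cast; ring
    rw [hcast, hr, List.foldl_append, ih]
    have htn : ((s : Int) + (k : Int)).toNat = s + k := by omega
    have hkn : ((k : Int)).toNat = k := by omega
    simp only [List.foldl_cons, List.foldl_nil, htn, hkn]
    have hM : (0 : Int) < 2 ^ (s + k) := by positivity
    have hbit : PySem.Int.band (num >>> ((s + k : Nat) : Int)) 1 = (num / 2 ^ (s + k)) % 2 := by
      rw [Int.shiftRight_natCast_right, PySem.Int.band_one,
        PySem.Int.mod_eq_emod_of_pos (by omega), Int.shiftRight_eq_div_pow]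
      norm_cast
    have hsplit := pv_emod_split num (2 ^ (s + k)) hM
    have hpow : (2 : Int) ^ (s + (k + 1)) = 2 * 2 ^ (s + k) := by
      rw [(by omega : s + (k + 1) = (s + k) + 1), pow_succ]; ring
    have hdiv : (num % 2 ^ (s + k) + ((num / 2 ^ (s + k)) % 2) * 2 ^ (s + k)) / 2 ^ s
        = (num % 2 ^ (s + k)) / 2 ^ s + ((num / 2 ^ (s + k)) % 2) * 2 ^ k := by
      have h2 : ((num / 2 ^ (s + k)) % 2) * 2 ^ (s + k) = (((num / 2 ^ (s + k)) % 2) * 2 ^ k) * 2 ^ s := by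
        rw [pow_add]; ring
      rw [h2, Int.add_mul_ediv_right _ _ (by positivity : (2 : Int) ^ s ≠ 0)]
    rw [Prod.mk.injEq]
    refine ⟨?_, ?_⟩
    · rw [hbit, Int.shiftLeft_eq, hpow, hsplit, hdiv]
    · push_cast; ring

-- ===== VERDICT (by name: the statement is the Claim_ definition above) =====
theorem getPartialValue_spec : Claim_equal_getPartialValue := by
  intro index1 index2 num _ hpre
  unfold Pre_getPartialValue at hpre
  unfold Spec_getPartialValue
  simp only [getPartialValue, getPartialValue_alt]
  have hs : index1 = ((index1.toNat : Nat) : Int) := by omega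
  by_cases h2 : index2 < 0
  · -- empty mask range, empty B range: both 0
    rw [PySem.List.pyRange_one_eq_nil (a := 0) (by omega),
        PySem.List.pyRange_one_eq_nil (a := index1) (by omega)]
    simp [PySem.Int.band_zero]
  · have hm : index2 + 1 = ((index2.toNat : Nat) : Int) + 1 := by omega
    rw [hm]
    simp only [pv_mask_sum index2.toNat]
    rw [pv_band_mask, Int.shiftRight_eq_div_pow]
    have hc : (((2 ^ index1.toNat : Nat)) : Int) = (2 : Int) ^ index1.toNat := by push_cast; ring
    rw [hc]
    by_cases hle : index1 ≤ index2
    · -- nonempty extraction range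
      have hn : ((index2.toNat : Nat) : Int) + 1
          = ((index1.toNat : Nat) : Int) + ((index2.toNat + 1 - index1.toNat : Nat) : Int) := by omega
      rw [hs, hn, pv_bfold num index1.toNat (index2.toNat + 1 - index1.toNat)]
      have he : index1.toNat + (index2.toNat + 1 - index1.toNat) = index2.toNat + 1 := by omega
      rw [he]
      have hx : ((max index1 0).toNat : Nat) = index1.toNat := by omega
      simp [hx]
    · -- index1 > index2 ≥ 0: A's shifted remainder is 0, B's range is empty
      rw [PySem.List.pyRange_one_eq_nil (a := index1) (by omega)]
      have h0 : 0 ≤ num % 2 ^ (index2.toNat + 1) := Int.emod_nonneg num (by positivity)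
      have h1 : num % 2 ^ (index2.toNat + 1) < (2 : Int) ^ index1.toNat := by
        have hlt := Int.emod_lt_of_pos num (b := 2 ^ (index2.toNat + 1)) (by positivity)
        have hle2 : (2 : Int) ^ (index2.toNat + 1) ≤ 2 ^ index1.toNat :=
          pow_le_pow_right₀ (by omega) (by omega)
        omega
      simp [Int.ediv_eq_zero_of_lt h0 h1]
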